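-- pv_equiv track=rewrite | github.com/jonusHK/algorithm_data_structure | practice/practice_42.py | solution
-- ===== SOURCE A (Python) =====
-- def solution(A):
--     A.sort()
--
--     left = 1
--     right = A[-1] - A[0]
--
--     while left < right:
--         mid = (left + right) // 2
--
--         sep_idx = 0
--         sep_num = A[0] + mid
--         for i in range(len(A)):
--             if A[i] <= sep_num:
--                 continue
--
--             sep_idx = i
--             break
--
--         if A[-1] - A[sep_idx] > mid:
--             left = mid + 1
--         else:
--             right = mid
--
--     return left
-- ===== SOURCE B (Python) =====
-- def solution(A):
--     # Note: A sorts its argument in place; B leaves it unmodified (return value equivalence).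
--     B = sorted(A)
--     if len(B) < 2:
--         return 1
--     lo, hi = B[0], B[-1]
--     best = hi - lo
--     for prev, cur in zip(B, B[1:]):
--         best = min(best, max(prev - lo, hi - cur))
--     return max(1, best)
-- ===== Notes on version B (the rewrite author's own statement) =====
-- stated objective: alternative
-- what changed: Replaced the binary search on the answer (each step rescanning the sorted list for the separation point) by one linear scan over adjacent pairs of the sorted list that takes the minimum over all split points of max(left spread, right spread), clamped to at least 1.
import Mathlib
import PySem

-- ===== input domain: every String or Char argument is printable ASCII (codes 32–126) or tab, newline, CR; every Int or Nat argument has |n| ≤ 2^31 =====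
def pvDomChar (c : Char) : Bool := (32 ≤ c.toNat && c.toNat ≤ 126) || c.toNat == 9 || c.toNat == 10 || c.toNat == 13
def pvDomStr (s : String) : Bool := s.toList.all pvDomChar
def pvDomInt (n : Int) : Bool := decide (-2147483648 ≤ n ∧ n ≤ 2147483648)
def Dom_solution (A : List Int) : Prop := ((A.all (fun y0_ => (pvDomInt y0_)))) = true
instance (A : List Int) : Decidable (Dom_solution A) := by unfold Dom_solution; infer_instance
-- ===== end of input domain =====

-- B replaces A's binary search on the answer by one linear scan over split points of the sorted list (objective: alternative).
-- Python A sorts its argument in place; B does not — the equivalence proved here is about the return value.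

-- ===== PORT A =====
-- the inner 'for i in range(len(A)): if A[i] <= sep_num: continue; sep_idx = i; break' loop,
-- state = (remaining list, current index i); returns 0 when the break never fires (sep_idx stays 0)
def sepLoop (l : List Int) (sepNum : Int) (i : Nat) : Nat :=
  match l with
  | [] => 0
  | x :: xs => if x ≤ sepNum then sepLoop xs sepNum (i + 1) else i

-- the 'while left < right' loop of A; 'fuel' is only a termination guard (each
-- iteration shrinks right - left, so fuel = (right - left).toNat never runs out)
def bsearchLoop (S : List Int) (left right : Int) : Nat → Int
  | 0 => left
  | fuel + 1 =>
    if left < right then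
      let mid := PySem.Int.floordiv (left + right) 2
      let sepIdx := sepLoop S ((PySem.List.pyGet? S 0).getD 0 + mid) 0
      if (PySem.List.pyGet? S (-1)).getD 0 - (PySem.List.pyGet? S ((sepIdx : Nat) : Int)).getD 0 > mid
      then bsearchLoop S (mid + 1) right fuel
      else bsearchLoop S left mid fuel
    else left
termination_by structural fuel => fuel

def solution (A : List Int) : Int :=
  let S := PySem.List.sorted A (fun x => x) false
  let right := (PySem.List.pyGet? S (-1)).getD 0 - (PySem.List.pyGet? S 0).getD 0
  bsearchLoop S 1 right (right - 1).toNat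

-- ===== PORT B =====
def solution_alt (A : List Int) : Int :=
  let B := PySem.List.sorted A (fun x => x) false
  if B.length < 2 then 1
  else
    let lo := (PySem.List.pyGet? B 0).getD 0
    let hi := (PySem.List.pyGet? B (-1)).getD 0
    max 1 ((B.zip (PySem.List.slice B (some 1) none)).foldl
      (fun best p => min best (max (p.1 - lo) (hi - p.2))) (hi - lo))

-- ===== PRECONDITION & SPEC =====
-- Pre excludes exactly the empty list, on which A raises IndexError reading the last element
def Pre_solution (A : List Int) : Prop := A ≠ []
instance (A : List Int) : Decidable (Pre_solution A) := by unfold Pre_solution; infer_instance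
def pvWitness_solution : List Int := [4, 1, 3, 2]

def Spec_solution (A : List Int) (out : Int) : Prop := out = solution_alt A
instance (A : List Int) (out : Int) : Decidable (Spec_solution A out) := by unfold Spec_solution; infer_instance

-- ===== CLAIM (what is proved, stated in full; the proofs are below) =====
def Claim_equal_solution : Prop := ∀ (A : List Int), Dom_solution A → Pre_solution A → Spec_solution A (solution A)


-- ===== LEMMAS AND PROOFS =====

-- proof-side abbreviations: A[0], A[-1] and the single-pass minimum of B, in List.getD form
def loS (S : List Int) : Int := S.getD 0 0
def hiS (S : List Int) : Int := S.getD (S.length - 1) 0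
def wS (S : List Int) : Int :=
  (S.zip S.tail).foldl (fun best p => min best (max (p.1 - loS S) (hiS S - p.2))) (hiS S - loS S)

-- bridges from the PySem expressions the ports use to List.getD
theorem pyGetD_nat (S : List Int) (k : Nat) :
    (PySem.List.pyGet? S ((k : Nat) : Int)).getD 0 = S.getD k 0 := by
  simp [PySem.List.pyGet?_natCast, List.getD_eq_getElem?_getD]

theorem pyGetD_zero' (S : List Int) : (PySem.List.pyGet? S 0).getD 0 = loS S := by
  simp [PySem.List.pyGet?_zero, loS, List.getD_eq_getElem?_getD]

theorem pyGetD_neg_one' (S : List Int) : (PySem.List.pyGet? S (-1)).getD 0 = hiS S := by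
  simp [PySem.List.pyGet?_neg_one, hiS, List.getD_eq_getElem?_getD, List.getLast?_eq_getElem?]

-- sorted access is monotone (getD form)
theorem mono (S : List Int) (hS : S.Pairwise (· ≤ ·)) {i j : Nat}
    (hij : i ≤ j) (hj : j < S.length) : S.getD i 0 ≤ S.getD j 0 := by
  rcases Nat.eq_or_lt_of_le hij with h | h
  · subst h; exact le_refl _
  · rw [List.getD_eq_getElem _ _ (lt_of_le_of_lt hij hj), List.getD_eq_getElem _ _ hj]
    exact (List.pairwise_iff_getElem.mp hS) i j (lt_of_le_of_lt hij hj) hj h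

theorem lo_le_getD (S : List Int) (hS : S.Pairwise (· ≤ ·)) {j : Nat} (hj : j < S.length) :
    loS S ≤ S.getD j 0 := mono S hS (Nat.zero_le j) hj


-- characterisation of the inner separation-point loop of A
theorem sepLoop_all (l : List Int) (t : Int) (h : ∀ x ∈ l, x ≤ t) (i : Nat) :
    sepLoop l t i = 0 := by
  induction l generalizing i with
  | nil => rfl
  | cons x xs ih =>
      simp only [sepLoop, if_pos (h x (by simp))]
      exact ih (fun y hy => h y (by simp [hy])) (i + 1)

theorem sepLoop_found (l : List Int) (t : Int) (h : ∃ x ∈ l, t < x) (i : Nat) :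
    ∃ k, k < l.length ∧ sepLoop l t i = i + k ∧ t < l.getD k 0 ∧ ∀ j < k, l.getD j 0 ≤ t := by
  induction l generalizing i with
  | nil => simp at h
  | cons x xs ih =>
      by_cases hx : x ≤ t
      · have hxs : ∃ y ∈ xs, t < y := by
          rcases h with ⟨y, hy, hty⟩
          rcases List.mem_cons.mp hy with rfl | hy'
          · omega
          · exact ⟨y, hy', hty⟩
        rcases ih hxs (i + 1) with ⟨k, hk1, hk2, hk3, hk4⟩
        refine ⟨k + 1, by simpa using Nat.succ_lt_succ hk1, ?_, by simpa using hk3, ?_⟩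
        · simp only [sepLoop, if_pos hx]; omega
        · intro j hj
          cases j with
          | zero => simpa using hx
          | succ j' => simpa using hk4 j' (by omega)
      · exact ⟨0, by simp, by simp [sepLoop, hx], by simpa using not_le.mp hx, by omega⟩

-- the while-loop's test, for mid ≥ 0, holds iff some split point works
theorem cond_iff (S : List Int) (hS : S.Pairwise (· ≤ ·)) (h2 : 2 ≤ S.length)
    {m : Int} (hm : 0 ≤ m) :
    (hiS S - S.getD (sepLoop S (loS S + m) 0) 0 ≤ m) ↔
      (∃ j : Nat, j + 1 < S.length ∧ S.getD j 0 - loS S ≤ m ∧ hiS S - S.getD (j + 1) 0 ≤ m) := by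
  have hlo : loS S = S.getD 0 0 := rfl
  have hhiD : hiS S = S.getD (S.length - 1) 0 := rfl
  by_cases hex : ∃ x ∈ S, loS S + m < x
  · rcases sepLoop_found S (loS S + m) hex 0 with ⟨k, hk1, hk2, hk3, hk4⟩
    simp only [Nat.zero_add] at hk2
    rw [hk2]
    have hk0 : 1 ≤ k := by
      by_contra hc
      have hk : k = 0 := by omega
      have := lo_le_getD S hS (j := 0) (by omega)
      rw [hk] at hk3
      omega
    constructor
    · intro hle
      exact ⟨k - 1, by omega, by have := hk4 (k - 1) (by omega); omega,
        by have : k - 1 + 1 = k := by omega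
           rw [this]; exact hle⟩
    · rintro ⟨j, hj, hjl, hjr⟩
      have hjk : j < k := by
        by_contra hc
        have := mono S hS (i := k) (j := j) (by omega) (by omega)
        omega
      have := mono S hS (i := j + 1) (j := k) (by omega) hk1
      omega
  · have hall : ∀ x ∈ S, x ≤ loS S + m := by
      intro x hx
      by_contra hc
      exact hex ⟨x, hx, by omega⟩
    rw [sepLoop_all S (loS S + m) hall 0]
    have hhi : hiS S ≤ loS S + m := by
      apply hall
      rw [hhiD, List.getD_eq_getElem _ _ (by omega : S.length - 1 < S.length)]
      exact List.getElem_mem _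
    constructor
    · intro _
      refine ⟨0, by omega, by omega, ?_⟩
      have e : (0 : Nat) + 1 = 1 := rfl
      rw [e]
      have := lo_le_getD S hS (j := 1) (by omega)
      omega
    · intro _
      omega

-- folding min over a list
theorem foldl_min_le {α : Type} (l : List α) (f : α → Int) (init m : Int) :
    l.foldl (fun a x => min a (f x)) init ≤ m ↔ init ≤ m ∨ ∃ x ∈ l, f x ≤ m := by
  induction l generalizing init with
  | nil => simp
  | cons y ys ih =>
      simp only [List.foldl_cons, ih, min_le_iff, List.mem_cons]
      constructor
      · rintro ((h | h) | ⟨x, hx, hfx⟩)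
        · exact Or.inl h
        · exact Or.inr ⟨y, Or.inl rfl, h⟩
        · exact Or.inr ⟨x, Or.inr hx, hfx⟩
      · rintro (h | ⟨x, hx | hx, hfx⟩)
        · exact Or.inl (Or.inl h)
        · subst hx; exact Or.inl (Or.inr hfx)
        · exact Or.inr ⟨x, hx, hfx⟩

theorem foldl_min_nonneg {α : Type} (l : List α) (f : α → Int) (init : Int)
    (h0 : 0 ≤ init) (hf : ∀ x ∈ l, 0 ≤ f x) :
    0 ≤ l.foldl (fun a x => min a (f x)) init := by
  induction l generalizing init with
  | nil => simpa using h0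
  | cons y ys ih =>
      simp only [List.foldl_cons]
      exact ih _ (le_min h0 (hf y (by simp)))
        (fun x hx => hf x (List.mem_cons_of_mem _ hx))

-- membership in zip S S.tail, index form
theorem mem_zip_tail_iff (S : List Int) (p : Int × Int) :
    p ∈ S.zip S.tail ↔ ∃ j : Nat, j + 1 < S.length ∧ p = (S.getD j 0, S.getD (j + 1) 0) := by
  rw [List.mem_iff_getElem]
  constructor
  · rintro ⟨j, hj, rfl⟩
    have hjlen : j + 1 < S.length := by
      simp [List.length_zip, List.length_tail] at hj
      omega
    refine ⟨j, hjlen, ?_⟩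
    rw [List.getElem_zip, List.getElem_tail,
      List.getD_eq_getElem _ _ (by omega), List.getD_eq_getElem _ _ hjlen]
  · rintro ⟨j, hj, rfl⟩
    refine ⟨j, by simp [List.length_zip, List.length_tail]; omega, ?_⟩
    rw [List.getElem_zip, List.getElem_tail,
      List.getD_eq_getElem _ _ (by omega), List.getD_eq_getElem _ _ hj]

theorem w_le_iff (S : List Int) (hS : S.Pairwise (· ≤ ·)) (h2 : 2 ≤ S.length)
    {m : Int} (hm : 0 ≤ m) :
    wS S ≤ m ↔
      (∃ j : Nat, j + 1 < S.length ∧ S.getD j 0 - loS S ≤ m ∧ hiS S - S.getD (j + 1) 0 ≤ m) := by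
  have hlo : loS S = S.getD 0 0 := rfl
  rw [wS, foldl_min_le]
  constructor
  · rintro (h | ⟨p, hp, hfp⟩)
    · refine ⟨0, by omega, by omega, ?_⟩
      have e : (0 : Nat) + 1 = 1 := rfl
      rw [e]
      have := lo_le_getD S hS (j := 1) (by omega)
      omega
    · rcases (mem_zip_tail_iff S p).mp hp with ⟨j, hj, rfl⟩
      have hfp' : max (S.getD j 0 - loS S) (hiS S - S.getD (j + 1) 0) ≤ m := by simpa using hfp
      rw [max_le_iff] at hfp'
      exact ⟨j, hj, hfp'.1, hfp'.2⟩
  · rintro ⟨j, hj, hl, hr⟩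
    refine Or.inr ⟨(S.getD j 0, S.getD (j + 1) 0),
      (mem_zip_tail_iff S _).mpr ⟨j, hj, rfl⟩, ?_⟩
    exact max_le hl hr

theorem w_nonneg (S : List Int) (hS : S.Pairwise (· ≤ ·)) (h1 : 1 ≤ S.length) : 0 ≤ wS S := by
  have hlo : loS S = S.getD 0 0 := rfl
  apply foldl_min_nonneg
  · have := lo_le_getD S hS (j := S.length - 1) (by omega)
    rw [show hiS S = S.getD (S.length - 1) 0 from rfl]
    omega
  · intro p hp
    rcases (mem_zip_tail_iff S p).mp hp with ⟨j, hj, rfl⟩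
    have := lo_le_getD S hS (j := j) (by omega)
    exact le_max_of_le_left (by omega)

theorem w_le_range (S : List Int) : wS S ≤ hiS S - loS S :=
  (foldl_min_le _ _ _ _).mpr (Or.inl (le_refl _))

-- the binary-search loop returns max l w when its test is 'w ≤ mid'
theorem bsearch_eq (S : List Int) (w : Int)
    (hcond : ∀ mid : Int, 1 ≤ mid →
      ((hiS S - S.getD (sepLoop S (loS S + mid) 0) 0 ≤ mid) ↔ w ≤ mid)) :
    ∀ fuel : Nat, ∀ l r : Int, (r - l).toNat ≤ fuel → 1 ≤ l → l ≤ r → w ≤ r →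
      bsearchLoop S l r fuel = max l w := by
  intro fuel
  induction fuel with
  | zero =>
    intro l r hn hl hlr hwr
    have hrl : l = r := by omega
    rw [bsearchLoop]
    omega
  | succ fuel ih =>
    intro l r hn hl hlr hwr
    rw [bsearchLoop]
    by_cases h : l < r
    · rw [if_pos h]
      set mid := PySem.Int.floordiv (l + r) 2 with hmid
      have hmlo : l ≤ mid :=
        (PySem.Int.le_floordiv_iff_mul_le (by omega)).mpr (by omega)
      have hmhi : mid < r :=
        (PySem.Int.floordiv_lt_iff_lt_mul (by omega)).mpr (by omega)
      have hbridge : ((PySem.List.pyGet? S (-1)).getD 0 -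
          (PySem.List.pyGet? S ((sepLoop S ((PySem.List.pyGet? S 0).getD 0 + mid) 0 : Nat) : Int)).getD 0 > mid)
          ↔ ¬ (w ≤ mid) := by
        rw [pyGetD_zero', pyGetD_nat, pyGetD_neg_one']
        rw [← hcond mid (by omega)]
        omega
      by_cases hw : w ≤ mid
      · rw [if_neg (by rw [hbridge]; simpa using hw)]
        exact ih l mid (by omega) hl hmlo hw
      · rw [if_pos (hbridge.mpr hw)]
        have := ih (mid + 1) r (by omega) (by omega) (by omega) hwr
        rw [this]
        omega
    · rw [if_neg h]
      omega

-- the two programs agree on any sorted list (A operates on sorted(A) only)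
theorem main_eq (S : List Int) (hS : S.Pairwise (· ≤ ·)) (h1 : 1 ≤ S.length) :
    bsearchLoop S 1 (hiS S - loS S) ((hiS S - loS S) - 1).toNat
      = if S.length < 2 then 1 else max 1 (wS S) := by
  have hlohi : loS S ≤ hiS S := lo_le_getD S hS (j := S.length - 1) (by omega)
  by_cases h2 : 2 ≤ S.length
  · rw [if_neg (by omega)]
    have hw0 : 0 ≤ wS S := w_nonneg S hS (by omega)
    have hwR : wS S ≤ hiS S - loS S := w_le_range S
    have hcond : ∀ mid : Int, 1 ≤ mid →
        ((hiS S - S.getD (sepLoop S (loS S + mid) 0) 0 ≤ mid) ↔ wS S ≤ mid) := by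
      intro mid hmid
      rw [cond_iff S hS h2 (by omega), w_le_iff S hS h2 (by omega)]
    by_cases hR : 1 ≤ hiS S - loS S
    · exact bsearch_eq S (wS S) hcond _ 1 (hiS S - loS S) (by omega) (le_refl 1) hR hwR
    · have hw : wS S = 0 := by omega
      have hf : (hiS S - loS S - 1).toNat = 0 := by omega
      have hR0 : hiS S - loS S = 0 := by omega
      rw [hf, hR0, bsearchLoop, hw]
      simp
  · rw [if_pos (by omega)]
    have hhl : hiS S = loS S := by
      rw [hiS, loS, show S.length - 1 = 0 by omega]
    rw [hhl]
    simp [bsearchLoop]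

-- ===== VERDICT (by name: the statement is the Claim_ definition above) =====
theorem solution_spec : Claim_equal_solution := by
  intro A _ hpre
  unfold Spec_solution solution solution_alt
  have hS : (PySem.List.sorted A (fun x => x) false).Pairwise (· ≤ ·) := by
    have := PySem.List.sorted_pairwise (xs := A) (key := fun x => x)
    simpa using this
  have hlen : 1 ≤ (PySem.List.sorted A (fun x => x) false).length := by
    rw [PySem.List.length_sorted]
    have : A ≠ [] := hpre
    exact List.length_pos_iff.mpr this
  simp only [pyGetD_zero', pyGetD_neg_one', PySem.List.slice_from_one]
  rw [main_eq _ hS hlen]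
  rfl
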